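-- pv_equiv track=rewrite | github.com/thefcraft/Efficia | db/helpers.py | encode_weekdays
-- ===== SOURCE A (Python) =====
-- from typing import TypedDict, Optional, List, Literal, Dict, NewType
--
-- def encode_weekdays(weekdays: List[Literal['sunday', 'monday', 'tuesday', 'wednesday', 'thursday', 'friday', 'saturday']]):
--     # mapping of weekdays to their binary positions (0 to 6)
--     day_map: Dict[Literal['sunday', 'monday', 'tuesday', 'wednesday', 'thursday', 'friday', 'saturday'], Literal[0, 1, 2, 3, 4, 5, 6]] = {
--         'sunday': 0,
--         'monday': 1,
--         'tuesday': 2,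
--         'wednesday': 3,
--         'thursday': 4,
--         'friday': 5,
--         'saturday': 6
--     }
--
--     # Initialize the binary number as 0
--     binary_number = 0
--
--     # Set the corresponding bits to 1 for the given weekdays
--     for day in weekdays:
--         if day in day_map:
--             # Using bitwise OR to set the bit at the correct position to 1
--             binary_number |= (1 << day_map[day])
--
--     return binary_number
-- ===== SOURCE B (Python) =====
-- CANONICAL = ['sunday', 'monday', 'tuesday', 'wednesday', 'thursday', 'friday', 'saturday']
--
-- def encode_weekdays(weekdays):
--     # Invert the traversal: scan the fixed 7-day table once and test membership
--     # of each day in a set built from the input (deduplicating up front).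
--     present = set(weekdays)
--     mask = 0
--     for i, day in enumerate(CANONICAL):
--         if day in present:
--             mask |= (1 << i)
--     return mask
-- ===== Notes on version B (the rewrite author's own statement) =====
-- stated objective: alternative
-- what changed: B inverts the traversal: it deduplicates the input into a set once and then scans the fixed canonical 7-day table with enumerate, setting bit i when day i is in that set, instead of A's scan over the input list testing each element against a positional dict.
import Mathlib
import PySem

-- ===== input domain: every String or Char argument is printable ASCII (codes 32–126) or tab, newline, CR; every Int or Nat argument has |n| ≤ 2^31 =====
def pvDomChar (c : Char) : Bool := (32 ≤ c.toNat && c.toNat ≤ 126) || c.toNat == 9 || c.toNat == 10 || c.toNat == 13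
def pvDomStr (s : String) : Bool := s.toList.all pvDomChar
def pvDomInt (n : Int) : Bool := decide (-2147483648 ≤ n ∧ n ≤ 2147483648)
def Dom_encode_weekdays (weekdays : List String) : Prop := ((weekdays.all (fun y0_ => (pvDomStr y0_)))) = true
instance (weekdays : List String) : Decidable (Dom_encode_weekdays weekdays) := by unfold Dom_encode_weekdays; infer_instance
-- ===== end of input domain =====

-- B inverts the traversal: it scans the fixed 7-day table once, testing membership in a set built
-- from the input, instead of scanning the input testing membership in a positional dict (alternative).

-- ===== PORT A =====
-- A's day_map, lifted to a module-level helper so the proofs can name it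
def pvDayMap : PySem.Dict String Int :=
  PySem.Dict.ofList [("sunday", 0), ("monday", 1), ("tuesday", 2), ("wednesday", 3),
                     ("thursday", 4), ("friday", 5), ("saturday", 6)]

-- `.toNat` on the shift amount is exact: every value stored in pvDayMap is 0..6
def encode_weekdays (weekdays : List String) : Int :=
  weekdays.foldl
    (fun binary_number day =>
      if pvDayMap.contains day then
        PySem.Int.bor binary_number ((1 : Int) <<< (pvDayMap.getD day 0).toNat)
      else binary_number)
    0

-- ===== PORT B =====
-- B's CANONICAL table
def pvCanonical : List String :=
  ["sunday", "monday", "tuesday", "wednesday", "thursday", "friday", "saturday"]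

-- `.toNat` on the enumerate index is exact: indices are 0..6
def encode_weekdays_alt (weekdays : List String) : Int :=
  let present : PySem.Set String := PySem.Set.ofList weekdays
  (PySem.List.enumerate pvCanonical 0).foldl
    (fun mask iday =>
      if PySem.Set.contains present iday.2 then
        PySem.Int.bor mask ((1 : Int) <<< iday.1.toNat)
      else mask)
    0

-- ===== PRECONDITION & SPEC =====
def Spec_encode_weekdays (weekdays : List String) (out : Int) : Prop := out = encode_weekdays_alt weekdays
instance (weekdays : List String) (out : Int) : Decidable (Spec_encode_weekdays weekdays out) := by unfold Spec_encode_weekdays; infer_instance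

-- ===== CLAIM (what is proved, stated in full; the proofs are below) =====
def Claim_equal_encode_weekdays : Prop := ∀ (weekdays : List String), Dom_encode_weekdays weekdays → Spec_encode_weekdays weekdays (encode_weekdays weekdays)

-- ===== LEMMAS AND PROOFS =====

-- the bit contributed by day d (at position k) given the input list ws
def pvBit (d : String) (ws : List String) (k : Nat) : Nat := if d ∈ ws then 1 <<< k else 0

-- the common mask, characterised by which of the 7 day names occur in ws
def pvMask (ws : List String) : Nat :=
  pvBit "sunday" ws 0 ||| pvBit "monday" ws 1 ||| pvBit "tuesday" ws 2 ||| pvBit "wednesday" ws 3 |||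
  pvBit "thursday" ws 4 ||| pvBit "friday" ws 5 ||| pvBit "saturday" ws 6

-- B computes pvMask: its fold over the enumerated table is a fixed 7-step computation
set_option maxHeartbeats 1000000 in
theorem pvLemB (ws : List String) : encode_weekdays_alt ws = (pvMask ws : Int) := by
  have he : PySem.List.enumerate pvCanonical 0 =
      [(0,"sunday"),(1,"monday"),(2,"tuesday"),(3,"wednesday"),(4,"thursday"),(5,"friday"),(6,"saturday")] := by decide
  have hc : ∀ d : String, PySem.Set.contains (PySem.Set.ofList ws) d = decide (d ∈ ws) := fun d => by simp [pysem]
  simp only [encode_weekdays_alt, he, List.foldl, hc, decide_eq_true_eq]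
  split_ifs <;> simp only [pvMask, pvBit, *, if_pos, if_neg, not_false_iff] <;> decide

-- A's loop invariant: folding A's body over ws ORs pvMask ws onto the accumulator
set_option maxHeartbeats 1000000 in
theorem pvLemA (ws : List String) (n : Nat) :
    ws.foldl
      (fun binary_number day =>
        if pvDayMap.contains day then
          PySem.Int.bor binary_number ((1 : Int) <<< (pvDayMap.getD day 0).toNat)
        else binary_number)
      (n : Int) = ((n ||| pvMask ws : Nat) : Int) := by
  induction ws generalizing n with
  | nil => simp [pvMask, pvBit]
  | cons d ds ih =>
    simp only [List.foldl]
    have hkeys : pvDayMap.keys = ["sunday","monday","tuesday","wednesday","thursday","friday","saturday"] := by decide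
    have hk := PySem.Dict.contains_eq_decide_mem_keys (d := pvDayMap) (k := d)
    rw [hkeys] at hk
    cases hc : pvDayMap.contains d with
    | false =>
      rw [if_neg (by simp)]
      rw [ih n]
      rw [hc] at hk
      have hmem := of_decide_eq_false hk.symm
      simp only [List.mem_cons, List.not_mem_nil, or_false, not_or] at hmem
      obtain ⟨h1, h2, h3, h4, h5, h6, h7⟩ := hmem
      congr 1
      simp [pvMask, pvBit, List.mem_cons, Ne.symm h1, Ne.symm h2, Ne.symm h3, Ne.symm h4,
            Ne.symm h5, Ne.symm h6, Ne.symm h7]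
    | true =>
      rw [if_pos (by simp)]
      rw [hc] at hk
      have hmem := of_decide_eq_true hk.symm
      fin_cases hmem
      · rw [show ((1:Int) <<< (pvDayMap.getD "sunday" 0).toNat) = ((1:Nat) : Int) from by decide]
        rw [PySem.Int.bor_natCast, ih]
        congr 1
        by_cases hm : "sunday" ∈ ds <;>
          simp [pvMask, pvBit, hm, List.mem_cons, Nat.or_assoc, Nat.or_left_comm]
      · rw [show ((1:Int) <<< (pvDayMap.getD "monday" 0).toNat) = ((2:Nat) : Int) from by decide]
        rw [PySem.Int.bor_natCast, ih]
        congr 1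
        by_cases hm : "monday" ∈ ds <;>
          simp [pvMask, pvBit, hm, List.mem_cons, Nat.or_assoc, Nat.or_comm, Nat.or_left_comm]
      · rw [show ((1:Int) <<< (pvDayMap.getD "tuesday" 0).toNat) = ((4:Nat) : Int) from by decide]
        rw [PySem.Int.bor_natCast, ih]
        congr 1
        by_cases hm : "tuesday" ∈ ds <;>
          simp [pvMask, pvBit, hm, List.mem_cons, Nat.or_assoc, Nat.or_comm, Nat.or_left_comm]
      · rw [show ((1:Int) <<< (pvDayMap.getD "wednesday" 0).toNat) = ((8:Nat) : Int) from by decide]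
        rw [PySem.Int.bor_natCast, ih]
        congr 1
        by_cases hm : "wednesday" ∈ ds <;>
          simp [pvMask, pvBit, hm, List.mem_cons, Nat.or_assoc, Nat.or_comm, Nat.or_left_comm]
      · rw [show ((1:Int) <<< (pvDayMap.getD "thursday" 0).toNat) = ((16:Nat) : Int) from by decide]
        rw [PySem.Int.bor_natCast, ih]
        congr 1
        by_cases hm : "thursday" ∈ ds <;>
          simp [pvMask, pvBit, hm, List.mem_cons, Nat.or_assoc, Nat.or_comm, Nat.or_left_comm]
      · rw [show ((1:Int) <<< (pvDayMap.getD "friday" 0).toNat) = ((32:Nat) : Int) from by decide]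
        rw [PySem.Int.bor_natCast, ih]
        congr 1
        by_cases hm : "friday" ∈ ds <;>
          simp [pvMask, pvBit, hm, List.mem_cons, Nat.or_assoc, Nat.or_comm, Nat.or_left_comm]
      · rw [show ((1:Int) <<< (pvDayMap.getD "saturday" 0).toNat) = ((64:Nat) : Int) from by decide]
        rw [PySem.Int.bor_natCast, ih]
        congr 1
        by_cases hm : "saturday" ∈ ds <;>
          simp [pvMask, pvBit, hm, List.mem_cons, Nat.or_assoc, Nat.or_comm, Nat.or_left_comm]

-- ===== VERDICT (by name: the statement is the Claim_ definition above) =====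
theorem encode_weekdays_spec : Claim_equal_encode_weekdays := by
  intro ws _
  unfold Spec_encode_weekdays
  have ha : encode_weekdays ws = (pvMask ws : Int) := by
    have := pvLemA ws 0
    simpa [encode_weekdays] using this
  rw [ha, pvLemB]
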